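-- pv_equiv track=rewrite | github.com/Rifa-Tasfiya/Algorithm-CSE221- | Greedy Algorithm/task2.py | scheduleIntervals
-- ===== SOURCE A (Python) =====
-- def scheduleIntervals(task_intervals, nmLst):
--     m_lst = [0] * int(nmLst[1])  # m= persons
--     total_activity = 0
--     task_size = len(task_intervals)
--     m_size = len(m_lst)
--     for i in range(task_size):
--         for j in range(m_size):
--             if task_intervals[i][0] >= int(m_lst[j]):
--                 m_lst[j] = task_intervals[i][1]
--                 total_activity += 1
--                 break
--     return total_activity
-- ===== SOURCE B (Python) =====
-- # Segment tree of range minima over the m persons: leftmost person with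
-- # finish-time <= task start found in O(log m), point-updated to the new finish.
-- # Tree node: ('L', val) leaf, or ('N', size, minval, left, right).
--
-- def _tmin(t):
--     return t[1] if t[0] == 'L' else t[2]
--
--
-- def _tsize(t):
--     return 1 if t[0] == 'L' else t[1]
--
--
-- def _build(n):
--     if n <= 1:
--         return ('L', 0)
--     h = n // 2
--     l = _build(h)
--     r = _build(n - h)
--     return ('N', n, 0, l, r)
--
--
-- def _query(t, x):
--     # leftmost index j with value(j) <= x, or None
--     if t[0] == 'L':
--         return 0 if t[1] <= x else None
--     mn, l, r = t[2], t[3], t[4]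
--     if mn > x:
--         return None
--     if _tmin(l) <= x:
--         return _query(l, x)
--     j = _query(r, x)
--     return None if j is None else _tsize(l) + j
--
--
-- def _update(t, i, v):
--     if t[0] == 'L':
--         return ('L', v)
--     sz, l, r = t[1], t[3], t[4]
--     ls = _tsize(l)
--     if i < ls:
--         l = _update(l, i, v)
--     else:
--         r = _update(r, i - ls, v)
--     return ('N', sz, min(_tmin(l), _tmin(r)), l, r)
--
--
-- def scheduleIntervals(task_intervals, nmLst):
--     m = int(nmLst[1])
--     if m <= 0:
--         return 0
--     tree = _build(m)
--     total = 0
--     for t in task_intervals: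
--         j = _query(tree, t[0])
--         if j is not None:
--             tree = _update(tree, j, t[1])
--             total += 1
--     return total
-- ===== Notes on version B (the rewrite author's own statement) =====
-- stated objective: faster
-- what changed: Replaces A's inner linear scan over the m persons (first j with finish <= start) by a segment tree of range minima with leftmost-index query and point update, built once over the m persons.
-- outside the precondition, e.g. on scheduleIntervals([[-1]], [0, 2]): A returns 0, B returns 0; on scheduleIntervals([[5]], [0, 2]): A raises IndexError, B raises IndexError
import Mathlib
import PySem

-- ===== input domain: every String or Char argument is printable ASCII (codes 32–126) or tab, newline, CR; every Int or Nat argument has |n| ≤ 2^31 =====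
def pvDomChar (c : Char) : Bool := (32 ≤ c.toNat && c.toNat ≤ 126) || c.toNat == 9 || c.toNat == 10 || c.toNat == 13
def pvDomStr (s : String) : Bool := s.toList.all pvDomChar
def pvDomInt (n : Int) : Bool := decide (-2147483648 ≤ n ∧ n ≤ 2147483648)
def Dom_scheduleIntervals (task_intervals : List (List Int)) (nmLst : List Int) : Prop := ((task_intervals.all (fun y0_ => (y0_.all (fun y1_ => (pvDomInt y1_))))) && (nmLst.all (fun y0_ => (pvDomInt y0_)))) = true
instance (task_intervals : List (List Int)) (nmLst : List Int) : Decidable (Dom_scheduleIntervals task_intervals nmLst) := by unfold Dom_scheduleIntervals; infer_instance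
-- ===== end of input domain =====

-- B replaces A's inner linear scan over the m persons by a segment tree of
-- range minima (leftmost person with finish-time ≤ task start, point update),
-- turning O(n·m) into O(m + n·log m); return values are proved identical.

-- ===== PORT A =====
-- inner `for j in range(m_size): if t[0] >= m_lst[j]: m_lst[j] = t[1]; total += 1; break`
def aInner (s f : Int) : List Int → List Int × Bool
  | [] => ([], false)
  | v :: rest =>
    if s ≥ v then (f :: rest, true)
    else
      let (r, b) := aInner s f rest
      (v :: r, b)

-- outer `for i in range(task_size)` loop carrying (m_lst, total_activity)
def aLoop : List (List Int) → List Int → Int → Int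
  | [], _, acc => acc
  | t :: ts, ml, acc =>
    let s := (PySem.List.pyGet? t 0).getD 0   -- t[0]; Pre_ guarantees it exists
    let f := (PySem.List.pyGet? t 1).getD 0   -- t[1]; Pre_ guarantees it exists
    let (ml', b) := aInner s f ml
    aLoop ts ml' (if b then acc + 1 else acc)

def scheduleIntervals (task_intervals : List (List Int)) (nmLst : List Int) : Int :=
  let m : Int := (PySem.List.pyGet? nmLst 1).getD 0   -- nmLst[1]; Pre_ guarantees it exists
  let m_lst : List Int := List.replicate m.toNat 0    -- [0] * m (empty for m ≤ 0, as in Python)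
  aLoop task_intervals m_lst 0

-- ===== PORT B =====
-- segment tree: leaf value, or node (size, min of subtree, left, right)
inductive STree where
  | leaf : Int → STree
  | node : Nat → Int → STree → STree → STree
deriving DecidableEq, Repr

def tmin : STree → Int
  | .leaf v => v
  | .node _ mn _ _ => mn

def tsize : STree → Nat
  | .leaf _ => 1
  | .node sz _ _ _ => sz

def build (n : Nat) : STree :=
  if _h : n ≤ 1 then .leaf 0
  else .node n 0 (build (n / 2)) (build (n - n / 2))
termination_by n
decreasing_by all_goals omega

-- leftmost index with value ≤ x, pruning subtrees whose minimum exceeds x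
def query : STree → Int → Option Nat
  | .leaf v, x => if v ≤ x then some 0 else none
  | .node _ mn l r, x =>
    if mn > x then none
    else if tmin l ≤ x then query l x
    else (query r x).map (fun j => tsize l + j)

def update : STree → Nat → Int → STree
  | .leaf _, _, v => .leaf v
  | .node sz _ l r, i, v =>
    if i < tsize l then
      let l' := update l i v
      .node sz (min (tmin l') (tmin r)) l' r
    else
      let r' := update r (i - tsize l) v
      .node sz (min (tmin l) (tmin r')) l r'

def bLoop : List (List Int) → STree → Int → Int
  | [], _, acc => acc
  | t :: ts, tr, acc =>
    match query tr ((PySem.List.pyGet? t 0).getD 0) with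
    | none => bLoop ts tr acc
    | some j => bLoop ts (update tr j ((PySem.List.pyGet? t 1).getD 0)) (acc + 1)

def scheduleIntervals_alt (task_intervals : List (List Int)) (nmLst : List Int) : Int :=
  let m : Int := (PySem.List.pyGet? nmLst 1).getD 0
  if m ≤ 0 then 0
  else bLoop task_intervals (build m.toNat) 0

-- ===== PRECONDITION & SPEC =====
-- Pre_ excludes exactly the inputs on which A may raise IndexError: nmLst shorter
-- than 2 (nmLst[1]), and, when there is at least one person, an interval shorter
-- than 2 (whether its [0]/[1] access actually raises depends on run state).
def Pre_scheduleIntervals (task_intervals : List (List Int)) (nmLst : List Int) : Prop :=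
  2 ≤ nmLst.length ∧ (nmLst.getD 1 0 ≤ 0 ∨ ∀ t ∈ task_intervals, 2 ≤ t.length)
instance (task_intervals : List (List Int)) (nmLst : List Int) : Decidable (Pre_scheduleIntervals task_intervals nmLst) := by unfold Pre_scheduleIntervals; infer_instance

def pvWitness_scheduleIntervals : List (List Int) × List Int := ([[0, 3], [1, 2], [2, 5]], [3, 2])

def Spec_scheduleIntervals (task_intervals : List (List Int)) (nmLst : List Int) (out : Int) : Prop := out = scheduleIntervals_alt task_intervals nmLst
instance (task_intervals : List (List Int)) (nmLst : List Int) (out : Int) : Decidable (Spec_scheduleIntervals task_intervals nmLst out) := by unfold Spec_scheduleIntervals; infer_instance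

-- ===== CLAIM (what is proved, stated in full; the proofs are below) =====
def Claim_equal_scheduleIntervals : Prop := ∀ (task_intervals : List (List Int)) (nmLst : List Int), Dom_scheduleIntervals task_intervals nmLst → Pre_scheduleIntervals task_intervals nmLst → Spec_scheduleIntervals task_intervals nmLst (scheduleIntervals task_intervals nmLst)

-- ===== LEMMAS AND PROOFS =====

def toList : STree → List Int
  | .leaf v => [v]
  | .node _ _ l r => toList l ++ toList r

def Wf : STree → Prop
  | .leaf _ => True
  | .node sz mn l r => Wf l ∧ Wf r ∧ sz = tsize l + tsize r ∧ mn = min (tmin l) (tmin r)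

-- reference first-fit search on a plain list
def ffind (x : Int) : List Int → Option Nat
  | [] => none
  | v :: rest => if v ≤ x then some 0 else (ffind x rest).map (· + 1)

theorem length_toList {t : STree} (h : Wf t) : (toList t).length = tsize t := by
  induction t with
  | leaf v => rfl
  | node sz mn l r ihl ihr =>
    obtain ⟨hl, hr, hsz, _⟩ := h
    simp [toList, tsize, ihl hl, ihr hr, hsz]

theorem tmin_le {t : STree} (h : Wf t) : ∀ v ∈ toList t, tmin t ≤ v := by
  induction t with
  | leaf v => simp [toList, tmin]
  | node sz mn l r ihl ihr =>
    obtain ⟨hl, hr, _, hmn⟩ := h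
    intro v hv
    simp only [toList, List.mem_append] at hv
    rcases hv with hv | hv
    · calc tmin (.node sz mn l r) = min (tmin l) (tmin r) := hmn
        _ ≤ tmin l := min_le_left _ _
        _ ≤ v := ihl hl v hv
    · calc tmin (.node sz mn l r) = min (tmin l) (tmin r) := hmn
        _ ≤ tmin r := min_le_right _ _
        _ ≤ v := ihr hr v hv

theorem tmin_mem {t : STree} (h : Wf t) : tmin t ∈ toList t := by
  induction t with
  | leaf v => simp [toList, tmin]
  | node sz mn l r ihl ihr =>
    obtain ⟨hl, hr, _, hmn⟩ := h
    simp only [toList, List.mem_append, tmin, hmn]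
    rcases min_choice (tmin l) (tmin r) with h' | h'
    · exact Or.inl (h' ▸ ihl hl)
    · exact Or.inr (h' ▸ ihr hr)

theorem ffind_eq_none {x : Int} {l : List Int} (h : ∀ v ∈ l, ¬ v ≤ x) : ffind x l = none := by
  induction l with
  | nil => rfl
  | cons v rest ih =>
    simp only [ffind]
    rw [if_neg (h v (by simp)), ih (fun w hw => h w (by simp [hw]))]
    rfl

theorem ffind_isSome {x : Int} {l : List Int} {v : Int} (hv : v ∈ l) (hle : v ≤ x) :
    (ffind x l).isSome := by
  induction l with
  | nil => simp at hv
  | cons w rest ih =>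
    simp only [ffind]
    split
    · simp
    · next hw =>
      rcases List.mem_cons.mp hv with rfl | hv'
      · exact absurd hle hw
      · simpa using ih hv'

theorem ffind_append (x : Int) (a b : List Int) :
    ffind x (a ++ b) = match ffind x a with
      | some j => some j
      | none => (ffind x b).map (· + a.length) := by
  induction a with
  | nil => simp [ffind]
  | cons v rest ih =>
    simp only [List.cons_append, ffind]
    split
    · rfl
    · rw [ih]
      cases h : ffind x rest with
      | some j => simp
      | none =>
        cases ffind x b <;> simp [Nat.add_assoc]

theorem ffind_lt_length {x : Int} {l : List Int} {j : Nat} (h : ffind x l = some j) :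
    j < l.length := by
  induction l generalizing j with
  | nil => simp [ffind] at h
  | cons v rest ih =>
    simp only [ffind] at h
    split at h
    · cases h; simp
    · cases hr : ffind x rest with
      | none => rw [hr] at h; simp at h
      | some k =>
        rw [hr] at h
        simp only [Option.map_some] at h
        cases h
        have := ih hr
        simp; omega

theorem query_eq {t : STree} (h : Wf t) (x : Int) : query t x = ffind x (toList t) := by
  induction t with
  | leaf v => simp [query, toList, ffind]
  | node sz mn l r ihl ihr =>
    obtain ⟨hl, hr, hsz, hmn⟩ := h
    simp only [query, toList]
    rw [ffind_append]
    by_cases hbig : mn > x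
    · rw [if_pos hbig]
      have hnone : ffind x (toList l) = none := by
        apply ffind_eq_none
        intro v hv hle
        have h1 : mn ≤ v := by
          rw [hmn]; exact le_trans (min_le_left _ _) (tmin_le hl v hv)
        omega
      have hnone2 : ffind x (toList r) = none := by
        apply ffind_eq_none
        intro v hv hle
        have h1 : mn ≤ v := by
          rw [hmn]; exact le_trans (min_le_right _ _) (tmin_le hr v hv)
        omega
      rw [hnone, hnone2]; rfl
    · rw [if_neg hbig]
      by_cases hlx : tmin l ≤ x
      · rw [if_pos hlx, ihl hl]
        have hs : (ffind x (toList l)).isSome := ffind_isSome (tmin_mem hl) hlx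
        cases hf : ffind x (toList l) with
        | none => rw [hf] at hs; simp at hs
        | some j => rfl
      · rw [if_neg hlx, ihr hr]
        have hnone : ffind x (toList l) = none := by
          apply ffind_eq_none
          intro v hv hle
          exact hlx (le_trans (tmin_le hl v hv) hle)
        rw [hnone, length_toList hl]
        cases ffind x (toList r) <;> simp [Nat.add_comm]

theorem tsize_update (t : STree) (i : Nat) (v : Int) : tsize (update t i v) = tsize t := by
  cases t with
  | leaf w => rfl
  | node sz mn l r => simp only [update]; split <;> rfl

theorem update_wf {t : STree} (h : Wf t) (i : Nat) (v : Int) : Wf (update t i v) := by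
  induction t generalizing i with
  | leaf w => trivial
  | node sz mn l r ihl ihr =>
    obtain ⟨hl, hr, hsz, _⟩ := h
    simp only [update]
    split
    · exact ⟨ihl hl _, hr, by rw [tsize_update]; exact hsz, rfl⟩
    · exact ⟨hl, ihr hr _, by rw [tsize_update]; exact hsz, rfl⟩

theorem update_node_lt (sz : Nat) (mn : Int) (l r : STree) (i : Nat) (v : Int) (h : i < tsize l) :
    update (.node sz mn l r) i v = .node sz (min (tmin (update l i v)) (tmin r)) (update l i v) r := by
  simp only [update]; rw [if_pos h]

theorem update_node_ge (sz : Nat) (mn : Int) (l r : STree) (i : Nat) (v : Int) (h : ¬ i < tsize l) :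
    update (.node sz mn l r) i v = .node sz (min (tmin l) (tmin (update r (i - tsize l) v))) l (update r (i - tsize l) v) := by
  simp only [update]; rw [if_neg h]

theorem toList_update {t : STree} (h : Wf t) : ∀ {i : Nat}, i < tsize t → ∀ (v : Int),
    toList (update t i v) = (toList t).set i v := by
  induction t with
  | leaf w =>
    intro i hi v
    simp only [tsize] at hi
    interval_cases i
    rfl
  | node sz mn l r ihl ihr =>
    intro i hi v
    obtain ⟨hl, hr, hsz, hmn⟩ := h
    simp only [tsize] at hi
    by_cases hlt : i < tsize l
    · rw [update_node_lt _ _ _ _ _ _ hlt]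
      simp only [toList]
      rw [ihl hl hlt, List.set_append_left _ _ (by rw [length_toList hl]; exact hlt)]
    · rw [update_node_ge _ _ _ _ _ _ hlt]
      have hri : i - tsize l < tsize r := by omega
      simp only [toList]
      rw [ihr hr hri, List.set_append_right _ _ (by rw [length_toList hl]; omega),
        length_toList hl]

theorem build_spec : ∀ n : Nat, 1 ≤ n →
    toList (build n) = List.replicate n 0 ∧ Wf (build n) ∧ tmin (build n) = 0 ∧ tsize (build n) = n := by
  intro n
  induction n using Nat.strong_induction_on with
  | _ n ih =>
    intro hn
    rw [build]
    by_cases h1 : n ≤ 1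
    · rw [dif_pos h1]
      have : n = 1 := by omega
      subst this
      exact ⟨rfl, trivial, rfl, rfl⟩
    · rw [dif_neg h1]
      have hhalf : 1 ≤ n / 2 ∧ n / 2 < n ∧ 1 ≤ n - n / 2 ∧ n - n / 2 < n := by omega
      obtain ⟨hL, hWl, hml, hsl⟩ := ih (n / 2) hhalf.2.1 hhalf.1
      obtain ⟨hR, hWr, hmr, hsr⟩ := ih (n - n / 2) hhalf.2.2.2 hhalf.2.2.1
      refine ⟨?_, ⟨hWl, hWr, by rw [hsl, hsr]; omega, by rw [hml, hmr]; simp⟩, rfl, rfl⟩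
      simp only [toList, hL, hR]
      rw [← List.replicate_add]
      congr 1
      omega

-- aInner is the first-fit search + set on a plain list
theorem aInner_eq (s f : Int) (ml : List Int) :
    aInner s f ml = match ffind s ml with
      | none => (ml, false)
      | some j => (ml.set j f, true) := by
  induction ml with
  | nil => rfl
  | cons v rest ih =>
    simp only [aInner, ffind]
    by_cases hv : v ≤ s
    · rw [if_pos (by exact hv), if_pos hv]
      rfl
    · rw [if_neg (by exact hv), if_neg hv, ih]
      cases ffind s rest <;> simp

theorem loop_eq : ∀ (ts : List (List Int)) (tr : STree) (ml : List Int) (acc : Int),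
    Wf tr → toList tr = ml → bLoop ts tr acc = aLoop ts ml acc := by
  intro ts
  induction ts with
  | nil => intro tr ml acc _ _; rfl
  | cons t rest ih =>
    intro tr ml acc hwf hml
    simp only [bLoop, aLoop]
    rw [aInner_eq, query_eq hwf, hml]
    cases hf : ffind ((PySem.List.pyGet? t 0).getD 0) ml with
    | none => exact ih tr ml acc hwf hml
    | some j =>
      have hj : j < tsize tr := by
        have := ffind_lt_length hf
        rw [← hml, length_toList hwf] at this
        exact this
      exact ih _ _ _ (update_wf hwf j _) (by rw [toList_update hwf hj, hml])

theorem aLoop_nil_persons : ∀ (ts : List (List Int)) (acc : Int), aLoop ts [] acc = acc := by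
  intro ts
  induction ts with
  | nil => intro acc; rfl
  | cons t rest ih => intro acc; simp only [aLoop, aInner]; exact ih acc

-- ===== VERDICT (by name: the statement is the Claim_ definition above) =====
theorem scheduleIntervals_spec : Claim_equal_scheduleIntervals := by
  unfold Claim_equal_scheduleIntervals
  intro ti nm _ _
  unfold Spec_scheduleIntervals
  simp only [scheduleIntervals, scheduleIntervals_alt]
  by_cases hle : (PySem.List.pyGet? nm 1).getD 0 ≤ 0
  · rw [if_pos hle, Int.toNat_of_nonpos hle]
    exact aLoop_nil_persons ti 0
  · rw [if_neg hle]
    obtain ⟨hL, hW, -, -⟩ := build_spec ((PySem.List.pyGet? nm 1).getD 0).toNat (by omega)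
    exact (loop_eq ti _ _ 0 hW hL).symm
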